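-- pv_equiv track=rewrite | github.com/sh4dow18/SU | Sh4dow18_Utilities.py | Phone_Number_Formatting
-- ===== SOURCE A (Python) =====
-- def Phone_Number_Formatting(telephone_number):
-- 	new_telephone_number = ""
-- 	telephone_number_Lenght = len(telephone_number)
-- 	if telephone_number_Lenght == 8 or telephone_number_Lenght == 9:
-- 		for i in range(0, telephone_number_Lenght):
-- 			new_telephone_number = new_telephone_number + telephone_number[i]
-- 			if telephone_number_Lenght == 8 and i == 3:
-- 				new_telephone_number = new_telephone_number + '-'
-- 			elif telephone_number_Lenght == 9 and new_telephone_number[i] == ' ':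
-- 				new_telephone_number = new_telephone_number[0:len(new_telephone_number) - 1:1]
-- 				new_telephone_number = new_telephone_number + '-'
-- 		new_telephone_number = "+506 " + new_telephone_number
-- 	return new_telephone_number
-- ===== SOURCE B (Python) =====
-- def Phone_Number_Formatting(telephone_number):
--     n = len(telephone_number)
--     if n == 8:
--         return "+506 " + telephone_number[:4] + "-" + telephone_number[4:]
--     if n == 9:
--         return "+506 " + "".join("-" if c == " " else c for c in telephone_number)
--     return ""
-- ===== Notes on version B (the rewrite author's own statement) =====
-- stated objective: simpler
-- what changed: Replaces the index loop that builds the result character by character (with trim-and-append surgery for spaces) by a closed form: slice-and-join for length 8, and a per-character conditional join (space->dash) for length 9.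
import Mathlib
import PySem

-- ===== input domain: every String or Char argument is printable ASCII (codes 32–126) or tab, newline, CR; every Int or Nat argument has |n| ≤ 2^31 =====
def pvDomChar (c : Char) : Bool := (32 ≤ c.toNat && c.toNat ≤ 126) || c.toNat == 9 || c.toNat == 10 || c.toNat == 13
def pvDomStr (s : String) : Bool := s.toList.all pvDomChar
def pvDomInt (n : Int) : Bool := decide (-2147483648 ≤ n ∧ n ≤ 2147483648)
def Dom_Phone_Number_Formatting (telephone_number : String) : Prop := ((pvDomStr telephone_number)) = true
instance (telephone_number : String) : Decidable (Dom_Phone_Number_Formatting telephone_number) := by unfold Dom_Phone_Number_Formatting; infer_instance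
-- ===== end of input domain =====

-- B replaces A's index loop that builds the result character by character (with trim-and-append
-- surgery on spaces) by a closed form: slices for length 8, a per-character conditional join for length 9 (simpler).

-- ===== PORT A =====
-- the building loop of A, over the character list of the input
def pvLoopA (cs : List Char) (n : Int) : List Char :=
  (PySem.List.pyRange 0 n 1).foldl (fun acc i =>
    let acc := acc ++ [PySem.List.pyGetD cs i ' ']
    if n == 8 && i == 3 then acc ++ ['-']
    else if n == 9 && (PySem.List.pyGetD acc i ' ' == ' ') then
      (PySem.List.slice acc (some 0) (some ((acc.length : Int) - 1))) ++ ['-']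
    else acc) []

def Phone_Number_Formatting (telephone_number : String) : String :=
  let n : Int := PySem.Str.len telephone_number
  if n == 8 || n == 9 then
    String.ofList ("+506 ".toList ++ pvLoopA telephone_number.toList n)
  else ""

-- ===== PORT B =====
def Phone_Number_Formatting_alt (telephone_number : String) : String :=
  let cs := telephone_number.toList
  let n : Int := PySem.Str.len telephone_number
  if n == 8 then
    String.ofList ("+506 ".toList ++ PySem.List.slice cs none (some 4) ++ ['-'] ++
                   PySem.List.slice cs (some 4) none)
  else if n == 9 then
    String.ofList ("+506 ".toList ++ cs.map (fun c => if c == ' ' then '-' else c))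
  else ""

-- ===== PRECONDITION & SPEC =====
def Spec_Phone_Number_Formatting (telephone_number : String) (out : String) : Prop := out = Phone_Number_Formatting_alt telephone_number
instance (telephone_number : String) (out : String) : Decidable (Spec_Phone_Number_Formatting telephone_number out) := by unfold Spec_Phone_Number_Formatting; infer_instance

-- ===== CLAIM (what is proved, stated in full; the proofs are below) =====
def Claim_equal_Phone_Number_Formatting : Prop := ∀ (telephone_number : String), Dom_Phone_Number_Formatting telephone_number → Spec_Phone_Number_Formatting telephone_number (Phone_Number_Formatting telephone_number)

-- ===== LEMMAS AND PROOFS =====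

-- length 8: the loop copies the characters and inserts '-' after index 3
theorem loopA_eight (cs : List Char) (h : cs.length = 8) :
    pvLoopA cs 8 = cs.take 4 ++ ['-'] ++ cs.drop 4 := by
  match cs, h with
  | [a,b,c,d,e,f,g,k], _ =>
    have hr : PySem.List.pyRange 0 8 1 = [0,1,2,3,4,5,6,7] := by decide
    unfold pvLoopA
    rw [hr]
    norm_num [PySem.List.pyGetD, PySem.List.pyGet?, PySem.List.pyIdx?]
    and_intros <;> rfl

-- A's n = 9 loop body, as a named function (definitionally the lambda of pvLoopA at n = 9)
def pvStep9 (cs acc : List Char) (i : Int) : List Char :=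
  let acc2 := acc ++ [PySem.List.pyGetD cs i ' ']
  if (9:Int) == 8 && i == 3 then acc2 ++ ['-']
  else if (9:Int) == 9 && (PySem.List.pyGetD acc2 i ' ' == ' ') then
    (PySem.List.slice acc2 (some 0) (some ((acc2.length : Int) - 1))) ++ ['-']
  else acc2

-- one iteration: when acc has length k, step k appends cs[k], dash-substituted if it is a space
theorem step9_eq (cs acc : List Char) (k : Nat) (hk : k < cs.length) (ha : acc.length = k) :
    pvStep9 cs acc (k:Int) = acc ++ [if cs[k] == ' ' then '-' else cs[k]] := by
  have h1 : PySem.List.pyGetD cs (k:Int) ' ' = cs[k] := by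
    simp [pysem]
    exact List.getD_eq_getElem cs ' ' hk
  have h2 : PySem.List.pyGetD (acc ++ [cs[k]]) (k:Int) ' ' = cs[k] := by
    simp [pysem]
    subst ha
    simp
  have h4 : (((acc ++ [cs[k]]).length : Int) - 1) = ((k:Nat):Int) := by
    simp [ha]
  have h5 : PySem.List.slice (acc ++ [cs[k]]) (some 0) (some (((acc ++ [cs[k]]).length : Int) - 1))
      = acc := by
    rw [h4, PySem.List.slice_zero_start]
    have := PySem.List.slice_to_natCast (acc ++ [cs[k]]) k
    rw [this, List.take_left' ha]
  unfold pvStep9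
  rw [h1]
  simp only [h2, h5]
  by_cases hc : cs[k] == ' '
  · simp [hc]
  · simp [hc]

-- loop invariant for n = 9: starting from an accumulator of length k, the remaining
-- iterations append the dash-substituted tail of cs
theorem loop9_aux (cs : List Char) (h : cs.length = 9) :
    ∀ (j k : Nat), j + k = 9 → ∀ acc : List Char, acc.length = k →
      (PySem.List.pyRange (k:Int) 9 1).foldl (pvStep9 cs) acc
        = acc ++ (cs.drop k).map (fun c => if c == ' ' then '-' else c) := by
  intro j
  induction j with
  | zero =>
    intro k hk acc ha
    have hk9 : k = 9 := by omega
    subst hk9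
    rw [PySem.List.pyRange_one_eq_nil (by norm_num)]
    simp [List.drop_eq_nil_of_le, h]
  | succ j ih =>
    intro k hk acc ha
    have hklt : k < 9 := by omega
    have hk9 : (k:Int) < 9 := by exact_mod_cast hklt
    rw [PySem.List.pyRange_one_cons hk9, List.foldl_cons,
        step9_eq cs acc k (by omega) ha]
    have hcast : (k:Int) + 1 = ((k+1 : Nat) : Int) := by push_cast; ring
    rw [hcast, ih (k+1) (by omega) _ (by simp [ha])]
    rw [List.append_assoc]
    congr 1
    rw [show cs.drop k = cs[k] :: cs.drop (k+1) from List.drop_eq_getElem_cons (by omega)]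
    simp only [List.map_cons, List.singleton_append]

theorem loopA_nine (cs : List Char) (h : cs.length = 9) :
    pvLoopA cs 9 = cs.map (fun c => if c == ' ' then '-' else c) := by
  have e : pvLoopA cs 9 = (PySem.List.pyRange 0 9 1).foldl (pvStep9 cs) [] := rfl
  rw [e]
  have := loop9_aux cs h 9 0 rfl [] rfl
  simpa using this

-- ===== VERDICT (by name: the statement is the Claim_ definition above) =====
theorem Phone_Number_Formatting_spec : Claim_equal_Phone_Number_Formatting := by
  intro s _
  unfold Spec_Phone_Number_Formatting Phone_Number_Formatting Phone_Number_Formatting_alt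
  have hq : s.length = s.toList.length := by simp
  have t1 : PySem.List.slice s.toList none (some 4) = s.toList.take 4 := by
    exact_mod_cast PySem.List.slice_to_natCast s.toList 4
  have t2 : PySem.List.slice s.toList (some 4) none = s.toList.drop 4 := by
    exact_mod_cast PySem.List.slice_from_natCast s.toList 4
  simp only [PySem.Str.len_eq]
  by_cases h8 : s.length = 8
  · have h8' : s.toList.length = 8 := by rw [← hq]; exact h8
    have e8 : ((s.length : Nat) : Int) = 8 := by omega
    simp [e8, loopA_eight s.toList h8', t1, t2]
  · have n8 : ¬ ((s.length : Nat) : Int) = 8 := by omega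
    by_cases h9 : s.length = 9
    · have h9' : s.toList.length = 9 := by rw [← hq]; exact h9
      have e9 : ((s.length : Nat) : Int) = 9 := by omega
      simp [e9, loopA_nine s.toList h9']
    · have n9 : ¬ ((s.length : Nat) : Int) = 9 := by omega
      simp [n8, n9]
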